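-- pv_equiv track=rewrite | github.com/Floorp-Projects/Floorp | build/midl.py | filter_preprocessor
-- ===== SOURCE A (Python) =====
-- def filter_preprocessor(cmd):
--     prev = None
--     for arg in cmd:
--         if arg == "-Xclang":
--             prev = arg
--             continue
--         if not arg.startswith("-std="):
--             if prev:
--                 yield prev
--             yield arg
--         prev = None
-- ===== SOURCE B (Python) =====
-- def filter_preprocessor(cmd):
--     cmd = list(cmd)
--     n = len(cmd)
--     i = 0
--     while i < n:
--         if cmd[i] != "-Xclang":
--             if not cmd[i].startswith("-std="):
--                 yield cmd[i]
--             i += 1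
--         else:
--             j = i
--             while j < n and cmd[j] == "-Xclang":
--                 j += 1
--             if j == n:
--                 return
--             if not cmd[j].startswith("-std="):
--                 yield "-Xclang"
--                 yield cmd[j]
--             i = j + 1
-- ===== Notes on version B (the rewrite author's own statement) =====
-- stated objective: alternative
-- what changed: Replaces the one-pass prev-state machine with an index-based scan that skips each run of consecutive '-Xclang' in an inner loop and decides per run whether to emit one '-Xclang' plus the following argument.
import Mathlib
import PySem

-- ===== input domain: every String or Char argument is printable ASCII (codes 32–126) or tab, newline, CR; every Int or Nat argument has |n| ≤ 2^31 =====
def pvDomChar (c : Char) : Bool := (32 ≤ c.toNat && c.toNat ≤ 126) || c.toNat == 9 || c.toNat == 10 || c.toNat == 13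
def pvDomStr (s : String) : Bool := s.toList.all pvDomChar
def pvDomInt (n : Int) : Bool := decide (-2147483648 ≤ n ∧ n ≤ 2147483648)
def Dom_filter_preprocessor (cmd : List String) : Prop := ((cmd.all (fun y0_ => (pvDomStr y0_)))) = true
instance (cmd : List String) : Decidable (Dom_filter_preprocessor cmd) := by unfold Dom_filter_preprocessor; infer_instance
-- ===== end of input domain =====

-- B replaces A's prev-state machine by an index scan that skips each run of
-- consecutive "-Xclang" in an inner loop (objective: alternative decomposition).
-- Both Pythons are generators; equivalence is about the list of yielded values.

-- ===== PORT A =====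
-- state: (yielded so far, prev); `if prev:` is truthy only when prev is a
-- (nonempty) string, here always "-Xclang", so Option matching is exact
def filter_preprocessor (cmd : List String) : List String :=
  (cmd.foldl
    (fun (st : List String × Option String) arg =>
      if arg == "-Xclang" then (st.1, some arg)
      else if ¬ (PySem.Str.startswith arg "-std=") then
        (st.1 ++ (match st.2 with | some p => [p] | none => []) ++ [arg], none)
      else (st.1, none))
    ([], none)).1

-- ===== PORT B =====
-- inner while loop: first index j ≥ i with cmd[j] ≠ "-Xclang" (or cmd.length);
-- the fuel argument (cmd.length - i suffices) only makes the loop structurally total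
def pvSkip (cmd : List String) : Nat → Nat → Nat
  | 0, i => i
  | fuel + 1, i =>
    if h : i < cmd.length then
      if cmd[i] == "-Xclang" then pvSkip cmd fuel (i + 1) else i
    else i

-- outer while loop of Source B, index i; fuel (cmd.length - i suffices) for totality only
def pvAltGo (cmd : List String) : Nat → Nat → List String
  | 0, _ => []
  | fuel + 1, i =>
    if h : i < cmd.length then
      if cmd[i] == "-Xclang" then
        let j := pvSkip cmd (cmd.length - i) i
        if hj : j < cmd.length then
          (if ¬ (PySem.Str.startswith cmd[j] "-std=") then ["-Xclang", cmd[j]] else [])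
            ++ pvAltGo cmd fuel (j + 1)
        else []
      else
        (if ¬ (PySem.Str.startswith cmd[i] "-std=") then [cmd[i]] else [])
          ++ pvAltGo cmd fuel (i + 1)
    else []

def filter_preprocessor_alt (cmd : List String) : List String :=
  pvAltGo cmd cmd.length 0

-- ===== PRECONDITION & SPEC =====
def Spec_filter_preprocessor (cmd : List String) (out : List String) : Prop := out = filter_preprocessor_alt cmd
instance (cmd : List String) (out : List String) : Decidable (Spec_filter_preprocessor cmd out) := by unfold Spec_filter_preprocessor; infer_instance

-- ===== CLAIM (what is proved, stated in full; the proofs are below) =====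
def Claim_equal_filter_preprocessor : Prop := ∀ (cmd : List String), Dom_filter_preprocessor cmd → Spec_filter_preprocessor cmd (filter_preprocessor cmd)

-- ===== LEMMAS AND PROOFS =====

-- A's loop body, named for the lemmas
def aStep (st : List String × Option String) (arg : String) : List String × Option String :=
  if arg == "-Xclang" then (st.1, some arg)
  else if ¬ (PySem.Str.startswith arg "-std=") then
    (st.1 ++ (match st.2 with | some p => [p] | none => []) ++ [arg], none)
  else (st.1, none)

theorem filter_preprocessor_def (cmd : List String) :
    filter_preprocessor cmd = (cmd.foldl aStep ([], none)).1 := rfl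

-- recursive characterisation of A's loop
def aRec : Option String → List String → List String
  | _, [] => []
  | prev, a :: l =>
    if a == "-Xclang" then aRec (some a) l
    else if ¬ (PySem.Str.startswith a "-std=") then
      ((match prev with | some p => [p] | none => []) ++ [a]) ++ aRec none l
    else aRec none l

theorem foldl_eq_aRec (l : List String) (acc : List String) (prev : Option String) :
    (l.foldl aStep (acc, prev)).1 = acc ++ aRec prev l := by
  induction l generalizing acc prev with
  | nil => simp [aRec]
  | cons a l ih =>
    rw [List.foldl_cons]
    by_cases h1 : a == "-Xclang"
    · have hstep : aStep (acc, prev) a = (acc, some a) := by simp [aStep, h1]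
      rw [hstep, ih]
      simp only [aRec]
      rw [if_pos h1]
    · by_cases h2 : PySem.Str.startswith a "-std="
      · have hstep : aStep (acc, prev) a = (acc, none) := by
          simp [aStep, h1]; simpa using h2
        rw [hstep, ih]
        simp only [aRec]
        rw [if_neg h1, if_neg (by simpa using h2)]
      · have hstep : aStep (acc, prev) a =
            (acc ++ ((match prev with | some p => [p] | none => []) ++ [a]), none) := by
          simp [aStep, h1]; simpa using h2
        rw [hstep, ih]
        simp only [aRec]
        rw [if_neg h1, if_pos (by simpa using h2), List.append_assoc]

theorem pvSkip_ge (cmd : List String) (fuel i : Nat) : i ≤ pvSkip cmd fuel i := by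
  induction fuel generalizing i with
  | zero => simp [pvSkip]
  | succ fuel ih =>
    simp only [pvSkip]
    split
    · split
      · have := ih (i + 1); omega
      · exact Nat.le_refl i
    · exact Nat.le_refl i

theorem pvSkip_stop (cmd : List String) (fuel i : Nat) (h : ¬ i < cmd.length) :
    pvSkip cmd fuel i = i := by
  cases fuel <;> simp [pvSkip, h]

theorem aRec_some_eq (cmd : List String) (fuel : Nat) :
    ∀ i, cmd.length - i ≤ fuel →
      aRec (some "-Xclang") (cmd.drop i) =
        (if hj : pvSkip cmd (cmd.length - i) i < cmd.length then
          (if ¬ (PySem.Str.startswith cmd[pvSkip cmd (cmd.length - i) i] "-std=") then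
            ["-Xclang", cmd[pvSkip cmd (cmd.length - i) i]] else [])
            ++ aRec none (cmd.drop (pvSkip cmd (cmd.length - i) i + 1))
        else []) := by
  induction fuel with
  | zero =>
    intro i hf
    have h : ¬ i < cmd.length := by omega
    rw [List.drop_eq_nil_of_le (by omega), pvSkip_stop cmd _ i h, dif_neg h]
    simp [aRec]
  | succ fuel ih =>
    intro i hf
    by_cases h : i < cmd.length
    · rw [List.drop_eq_getElem_cons h]
      by_cases hx : cmd[i] == "-Xclang"
      · have heq : (cmd[i] : String) = "-Xclang" := by simpa using hx
        have hn : cmd.length - i = (cmd.length - (i + 1)) + 1 := by omega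
        have hs : pvSkip cmd (cmd.length - i) i = pvSkip cmd (cmd.length - (i + 1)) (i + 1) := by
          rw [hn]; simp [pvSkip, h, hx]
        rw [hs]
        simp only [aRec]
        rw [if_pos hx, heq]
        exact ih (i + 1) (by omega)
      · have hn : cmd.length - i = (cmd.length - (i + 1)) + 1 := by omega
        have hs : pvSkip cmd (cmd.length - i) i = i := by
          rw [hn]; simp [pvSkip, h, hx]
        rw [hs]
        simp only [aRec]
        rw [if_neg hx, dif_pos h]
        by_cases h2 : PySem.Str.startswith cmd[i] "-std="
        · rw [if_neg (by simpa using h2), if_neg (by simpa using h2)]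
          simp
        · rw [if_pos (by simpa using h2), if_pos (by simpa using h2)]
          simp
    · rw [List.drop_eq_nil_of_le (by omega), pvSkip_stop cmd _ i h, dif_neg h]
      simp [aRec]

theorem pvAltGo_eq (cmd : List String) (fuel : Nat) :
    ∀ i, cmd.length - i ≤ fuel → pvAltGo cmd fuel i = aRec none (cmd.drop i) := by
  induction fuel with
  | zero =>
    intro i hf
    rw [List.drop_eq_nil_of_le (by omega)]
    simp [pvAltGo, aRec]
  | succ fuel ih =>
    intro i hf
    by_cases h : i < cmd.length
    · rw [List.drop_eq_getElem_cons h]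
      simp only [pvAltGo]
      rw [dif_pos h]
      by_cases hx : cmd[i] == "-Xclang"
      · have heq : (cmd[i] : String) = "-Xclang" := by simpa using hx
        rw [if_pos hx]
        simp only [aRec]
        rw [if_pos hx, heq]
        have hn : cmd.length - i = (cmd.length - (i + 1)) + 1 := by omega
        have hs : pvSkip cmd (cmd.length - i) i = pvSkip cmd (cmd.length - (i + 1)) (i + 1) := by
          rw [hn]; simp [pvSkip, h, hx]
        rw [aRec_some_eq cmd (cmd.length - (i + 1)) (i + 1) (Nat.le_refl _), ← hs]
        have hge : i ≤ pvSkip cmd (cmd.length - i) i := pvSkip_ge cmd _ i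
        by_cases hj : pvSkip cmd (cmd.length - i) i < cmd.length
        · rw [dif_pos hj, dif_pos hj, ih (pvSkip cmd (cmd.length - i) i + 1) (by omega)]
        · rw [dif_neg hj, dif_neg hj]
      · rw [if_neg hx]
        simp only [aRec]
        rw [if_neg hx, ih (i + 1) (by omega)]
        by_cases h2 : PySem.Str.startswith cmd[i] "-std="
        · rw [if_neg (by simpa using h2), if_neg (by simpa using h2)]
          simp
        · rw [if_pos (by simpa using h2), if_pos (by simpa using h2)]
          simp
    · rw [List.drop_eq_nil_of_le (by omega)]
      simp [pvAltGo, aRec, h]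

-- ===== VERDICT (by name: the statement is the Claim_ definition above) =====
theorem filter_preprocessor_spec : Claim_equal_filter_preprocessor := by
  intro cmd _
  unfold Spec_filter_preprocessor filter_preprocessor_alt
  rw [filter_preprocessor_def, foldl_eq_aRec,
    pvAltGo_eq cmd cmd.length 0 (by omega)]
  simp
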